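-- pv_equiv track=rewrite | github.com/Tulpana/ARC-AGI-2 | arc_agi_2_submission/ril/pattern_ops.py | _outline_mask
-- ===== SOURCE A (Python) =====
-- from typing import Any, Dict, Iterable, List, Optional, Sequence, Tuple
--
-- Mask = List[List[bool]]
--
-- def _zero_mask(h: int, w: int, fill: bool = False) -> Mask:
--     return [[fill for _ in range(w)] for _ in range(h)]
--
-- def _outline_mask(mask: Mask) -> Mask:
--     h = len(mask)
--     w = len(mask[0]) if h else 0
--     result = _zero_mask(h, w)
--     for y in range(h):
--         for x in range(w):
--             if not mask[y][x]:
--                 continue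
--             keep = False
--             for dy, dx in ((1, 0), (-1, 0), (0, 1), (0, -1)):
--                 ny, nx = y + dy, x + dx
--                 if ny < 0 or ny >= h or nx < 0 or nx >= w or not mask[ny][nx]:
--                     keep = True
--                     break
--             if keep:
--                 result[y][x] = True
--     return result
-- ===== SOURCE B (Python) =====
-- def _outline_mask(mask):
--     h = len(mask)
--     w = len(mask[0]) if h else 0
--     boundary = set()
--     # dilate the complement: every True cell 4-adjacent to a False cell is outline
--     for y in range(h):
--         for x in range(w):
--             if not mask[y][x]:
--                 for ny, nx in ((y + 1, x), (y - 1, x), (y, x + 1), (y, x - 1)):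
--                     if 0 <= ny < h and 0 <= nx < w and mask[ny][nx]:
--                         boundary.add((ny, nx))
--     # True cells on the grid border are outline as well (their outside neighbour is False)
--     for y in range(h):
--         for x in range(w):
--             if (y == 0 or y == h - 1 or x == 0 or x == w - 1) and mask[y][x]:
--                 boundary.add((y, x))
--     return [[(y, x) in boundary for x in range(w)] for y in range(h)]
-- ===== Notes on version B (the rewrite author's own statement) =====
-- stated objective: alternative
-- what changed: A gathers: for each True cell it probes the four neighbour offsets and breaks on the first out-of-bounds or False one, mutating a preallocated zero grid; B scatters: it dilates the complement into a set of marked coordinates (each False cell adds its in-bounds True neighbours to the set), adds the True cells on the grid border in a second sweep, and renders the grid from set membership.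
import Mathlib
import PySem

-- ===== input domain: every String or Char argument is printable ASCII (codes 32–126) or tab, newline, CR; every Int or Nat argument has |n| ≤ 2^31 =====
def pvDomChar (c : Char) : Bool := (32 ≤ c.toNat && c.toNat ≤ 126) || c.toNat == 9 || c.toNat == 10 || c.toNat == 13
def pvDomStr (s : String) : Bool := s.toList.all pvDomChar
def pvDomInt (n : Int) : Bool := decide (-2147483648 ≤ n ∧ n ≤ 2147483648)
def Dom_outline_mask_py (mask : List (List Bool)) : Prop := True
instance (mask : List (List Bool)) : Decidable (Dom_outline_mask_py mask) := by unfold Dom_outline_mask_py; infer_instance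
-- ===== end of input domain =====

-- B replaces A's gather (per-True-cell neighbour probe with break) by a scatter: it dilates the
-- COMPLEMENT into a set of marked cells (each False cell marks its True neighbours), adds the True
-- border cells, and renders the set; alternative decomposition, same cost.

-- ===== PORT A =====
-- mask[y][x] for a (possibly negative) Int index y/x; total via default false, exact inside Pre_
def pvCell (mask : List (List Bool)) (y x : Int) : Bool :=
  PySem.List.pyGetD (PySem.List.pyGetD mask y []) x false

-- _zero_mask h w fill
def pvZeroMask (h w : Nat) (fill : Bool) : List (List Bool) :=
  (List.range h).map (fun _ => (List.range w).map (fun _ => fill))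

-- A's inner 'for dy, dx in ((1,0),(-1,0),(0,1),(0,-1)): … break' loop (break-on-first = any)
def pvKeep (mask : List (List Bool)) (h w : Nat) (y x : Nat) : Bool :=
  [((1:Int),(0:Int)), (-1,0), (0,1), (0,-1)].any (fun d =>
    decide ((y:Int) + d.1 < 0) || decide ((h:Int) ≤ (y:Int) + d.1) ||
    decide ((x:Int) + d.2 < 0) || decide ((w:Int) ≤ (x:Int) + d.2) ||
    !(pvCell mask ((y:Int) + d.1) ((x:Int) + d.2)))

def outline_mask_py (mask : List (List Bool)) : List (List Bool) :=
  let h := mask.length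
  let w := if h ≠ 0 then (mask.headD []).length else 0
  (List.range h).foldl (fun res (y : Nat) =>
    (List.range w).foldl (fun res (x : Nat) =>
      if !(pvCell mask (y:Int) (x:Int)) then res
      else if pvKeep mask h w y x then res.set y ((res.getD y []).set x true) else res)
      res)
    (pvZeroMask h w false)

-- ===== PORT B =====
-- mask[y][x] with plain non-negative Nat indices
def pvCellN (mask : List (List Bool)) (y x : Nat) : Bool :=
  (mask.getD y []).getD x false

-- ((y+1,x),(y-1,x),(y,x+1),(y,x-1))
def pvNbrs (y x : Int) : List (Int × Int) := [(y + 1, x), (y - 1, x), (y, x + 1), (y, x - 1)]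

-- '0 <= ny < h and 0 <= nx < w and mask[ny][nx]'
def pvInB (mask : List (List Bool)) (h w : Nat) (p : Int × Int) : Bool :=
  decide (0 ≤ p.1) && decide (p.1 < (h:Int)) && decide (0 ≤ p.2) && decide (p.2 < (w:Int)) &&
    pvCell mask p.1 p.2

-- first loop: every True cell 4-adjacent to a False cell, scattered from the False cells
def pvScatter (mask : List (List Bool)) (h w : Nat) : PySem.Set (Int × Int) :=
  (List.range h).foldl (fun s (y : Nat) =>
    (List.range w).foldl (fun s (x : Nat) =>
      if !(pvCellN mask y x) then
        (pvNbrs (y:Int) (x:Int)).foldl (fun s p =>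
          if pvInB mask h w p then PySem.Set.add s p else s) s
      else s) s) PySem.Set.empty

-- second loop: True cells on the grid border
def pvBoundary (mask : List (List Bool)) (h w : Nat) : PySem.Set (Int × Int) :=
  (List.range h).foldl (fun s (y : Nat) =>
    (List.range w).foldl (fun s (x : Nat) =>
      if (decide (y = 0) || decide (y = h - 1) || decide (x = 0) || decide (x = w - 1)) &&
          pvCellN mask y x
      then PySem.Set.add s ((y:Int), (x:Int)) else s) s) (pvScatter mask h w)

def outline_mask_py_alt (mask : List (List Bool)) : List (List Bool) :=
  let h := mask.length
  let w := if h ≠ 0 then (mask.headD []).length else 0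
  let boundary := pvBoundary mask h w
  (List.range h).map (fun (y : Nat) => (List.range w).map (fun (x : Nat) =>
    PySem.Set.contains boundary ((y:Int), (x:Int))))

-- ===== PRECONDITION & SPEC =====
-- Pre_ excludes exactly the ragged masks on which both Pythons raise IndexError:
-- some row shorter than the first row (every cell mask[y][x] with x < len(mask[0]) is read).
def Pre_outline_mask_py (mask : List (List Bool)) : Prop :=
  ∀ row ∈ mask, (mask.headD []).length ≤ row.length
instance (mask : List (List Bool)) : Decidable (Pre_outline_mask_py mask) := by
  unfold Pre_outline_mask_py; infer_instance

def pvWitness_outline_mask_py : List (List Bool) := [[true, false], [true, true]]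

def Spec_outline_mask_py (mask : List (List Bool)) (out : List (List Bool)) : Prop := out = outline_mask_py_alt mask
instance (mask : List (List Bool)) (out : List (List Bool)) : Decidable (Spec_outline_mask_py mask out) := by unfold Spec_outline_mask_py; infer_instance

-- ===== CLAIM (what is proved, stated in full; the proofs are below) =====
def Claim_equal_outline_mask_py : Prop := ∀ (mask : List (List Bool)), Dom_outline_mask_py mask → Pre_outline_mask_py mask → Spec_outline_mask_py mask (outline_mask_py mask)

-- ===== LEMMAS AND PROOFS =====

-- ---- A side: the double fold over the preallocated grid ----

def pvRowStep (c : Nat → Bool) (r : List Bool) (x : Nat) : List Bool :=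
  if c x then r.set x true else r

theorem pvRowFold_length (c : Nat → Bool) (r : List Bool) (l : List Nat) :
    (l.foldl (pvRowStep c) r).length = r.length := by
  induction l generalizing r with
  | nil => rfl
  | cons x l ih => simp only [List.foldl_cons, pvRowStep]; split <;> simp [ih]

theorem pvRowFold_getElem? (c : Nat → Bool) (r : List Bool) (n j : Nat) :
    ((List.range n).foldl (pvRowStep c) r)[j]? =
      if j < n then r[j]?.map (fun b => b || c j) else r[j]? := by
  induction n with
  | zero => simp
  | succ n ih =>
    rw [List.range_succ, List.foldl_append]
    simp only [List.foldl_cons, List.foldl_nil, pvRowStep]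
    have hlen : ((List.range n).foldl (pvRowStep c) r).length = r.length :=
      pvRowFold_length c r _
    by_cases hc : c n
    · simp only [hc, if_true, List.getElem?_set, hlen]
      rcases Nat.lt_trichotomy j n with hj | hj | hj
      · simp [ih, Nat.ne_of_gt hj, hj, Nat.lt_succ_of_lt hj]
      · subst hj
        simp only [Nat.lt_succ_self, if_pos]
        by_cases hr : j < r.length
        · simp [hr, hc]
        · simp [hr]
      · have : ¬ j < n := Nat.lt_asymm hj
        have h2 : ¬ j < n + 1 := by omega
        simp [ih, this, h2, Nat.ne_of_lt hj]
    · simp only [hc, Bool.false_eq_true, if_false]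
      rcases Nat.lt_trichotomy j n with hj | hj | hj
      · simp [ih, hj, Nat.lt_succ_of_lt hj]
      · subst hj
        have h2 := ih
        rw [if_neg (Nat.lt_irrefl j)] at h2
        rw [h2, if_pos (Nat.lt_succ_self j)]
        cases h : r[j]? <;> simp [hc]
      · have : ¬ j < n := Nat.lt_asymm hj
        have h2 : ¬ j < n + 1 := by omega
        simp [ih, this, h2]

theorem pvRowFold_zero (c : Nat → Bool) (w : Nat) :
    (List.range w).foldl (pvRowStep c) ((List.range w).map (fun _ => false)) =
      (List.range w).map c := by
  apply List.ext_getElem?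
  intro j
  rw [pvRowFold_getElem?]
  by_cases hj : j < w
  · simp [hj]
  · simp [hj]

theorem pvInner_eq (mask : List (List Bool)) (h w : Nat) (y : Nat) (res : List (List Bool))
    (hy : y < res.length) (cellF : List (List Bool) → Int → Int → Bool)
    (keepF : List (List Bool) → Nat → Nat → Nat → Nat → Bool) :
    (List.range w).foldl (fun res (x : Nat) =>
      if !(cellF mask (y:Int) (x:Int)) then res
      else if keepF mask h w y x then res.set y ((res.getD y []).set x true) else res) res
    = res.set y ((List.range w).foldl
        (pvRowStep (fun x => cellF mask (y:Int) (x:Int) && keepF mask h w y x)) (res.getD y [])) := by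
  generalize (List.range w) = l
  induction l generalizing res with
  | nil =>
    simp only [List.foldl_nil]
    rw [List.getD_eq_getElem?_getD, List.getElem?_eq_getElem hy]
    simp [List.set_getElem_self]
  | cons x l ih =>
    simp only [List.foldl_cons, pvRowStep]
    by_cases hcell : cellF mask (y:Int) (x:Int)
    · by_cases hkeep : keepF mask h w y x
      · rw [if_neg (by simp [hcell]), if_pos hkeep]
        rw [ih _ (by simpa using hy), List.set_set]
        have hget : (res.set y ((res.getD y []).set x true)).getD y [] = (res.getD y []).set x true := by
          rw [List.getD_eq_getElem?_getD, List.getElem?_set_self hy]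
          rfl
        rw [hget]
        congr 1
        simp [hcell, hkeep]
      · rw [if_neg (by simp [hcell]), if_neg hkeep, ih _ hy]
        congr 2
        simp [hcell, hkeep]
    · rw [if_pos (by simp [hcell]), ih _ hy]
      congr 2
      simp [hcell]

theorem pvGrid_spec (mask : List (List Bool)) (h w : Nat)
    (cellF : List (List Bool) → Int → Int → Bool)
    (keepF : List (List Bool) → Nat → Nat → Nat → Nat → Bool) (n : Nat) (hn : n ≤ h) :
    ((List.range n).foldl (fun res (y : Nat) =>
      (List.range w).foldl (fun res (x : Nat) =>
        if !(cellF mask (y:Int) (x:Int)) then res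
        else if keepF mask h w y x then res.set y ((res.getD y []).set x true) else res) res)
      (pvZeroMask h w false)).length = h ∧
    ∀ j : Nat, ((List.range n).foldl (fun res (y : Nat) =>
      (List.range w).foldl (fun res (x : Nat) =>
        if !(cellF mask (y:Int) (x:Int)) then res
        else if keepF mask h w y x then res.set y ((res.getD y []).set x true) else res) res)
      (pvZeroMask h w false))[j]? =
        if j < n then some ((List.range w).map
          (fun x : Nat => cellF mask (j:Int) (x:Int) && keepF mask h w j x))
        else (pvZeroMask h w false)[j]? := by
  induction n with
  | zero =>
    refine ⟨by simp [pvZeroMask], ?_⟩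
    intro j; simp
  | succ n ihn =>
    obtain ⟨ihl, ihg⟩ := ihn (Nat.le_of_succ_le hn)
    rw [List.range_succ, List.foldl_append, List.foldl_cons, List.foldl_nil]
    rw [pvInner_eq mask h w n _ (by rw [ihl]; omega) cellF keepF]
    have hgetn : ((List.range n).foldl (fun res (y : Nat) =>
      (List.range w).foldl (fun res (x : Nat) =>
        if !(cellF mask (y:Int) (x:Int)) then res
        else if keepF mask h w y x then res.set y ((res.getD y []).set x true) else res) res)
      (pvZeroMask h w false)).getD n [] = (List.range w).map (fun _ => false) := by
      rw [List.getD_eq_getElem?_getD, ihg n, if_neg (Nat.lt_irrefl n)]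
      simp [pvZeroMask, show n < h by omega]
    rw [hgetn, pvRowFold_zero]
    constructor
    · simp only [List.length_set]; exact ihl
    · intro j
      rw [List.getElem?_set]
      by_cases hjn : n = j
      · subst hjn
        rw [if_pos rfl, ihl, if_pos (show n < h by omega), if_pos (Nat.lt_succ_self n)]
      · rw [if_neg hjn, ihg j]
        by_cases hj : j < n
        · simp [hj, show j < n + 1 by omega]
        · simp [hj, show ¬ (j < n + 1) by omega]

theorem pvCell_natCast (mask : List (List Bool)) (y x : Nat) :
    pvCell mask (y:Int) (x:Int) = pvCellN mask y x := by
  simp [pvCell, pvCellN, PySem.List.pyGetD_natCast]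

-- ---- B side: membership in the fold-built sets ----

theorem pvMemFold {α ι : Type} [BEq α] [LawfulBEq α]
    (f : PySem.Set α → ι → PySem.Set α) (P : ι → α → Prop)
    (hf : ∀ s i p, p ∈ f s i ↔ p ∈ s ∨ P i p) (l : List ι) (s : PySem.Set α) (p : α) :
    p ∈ l.foldl f s ↔ p ∈ s ∨ ∃ i ∈ l, P i p := by
  induction l generalizing s with
  | nil => simp
  | cons i l ih =>
    simp only [List.foldl_cons, ih, hf, List.mem_cons]
    constructor
    · rintro ((hs | hi) | ⟨j, hj, hP⟩)
      · exact Or.inl hs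
      · exact Or.inr ⟨i, Or.inl rfl, hi⟩
      · exact Or.inr ⟨j, Or.inr hj, hP⟩
    · rintro (hs | ⟨j, (rfl | hj), hP⟩)
      · exact Or.inl (Or.inl hs)
      · exact Or.inl (Or.inr hP)
      · exact Or.inr ⟨j, hj, hP⟩

theorem pvMem_scatter (mask : List (List Bool)) (h w : Nat) (p : Int × Int) :
    p ∈ pvScatter mask h w ↔
      ∃ yy ∈ List.range h, ∃ xx ∈ List.range w, pvCellN mask yy xx = false ∧
        ∃ q ∈ pvNbrs (yy:Int) (xx:Int), pvInB mask h w q = true ∧ p = q := by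
  unfold pvScatter
  rw [pvMemFold _ (fun (y : Nat) p => ∃ xx ∈ List.range w, pvCellN mask y xx = false ∧
        ∃ q ∈ pvNbrs (y:Int) (xx:Int), pvInB mask h w q = true ∧ p = q) ?_ ]
  · simp [PySem.Set.empty]
  · intro s y p
    rw [pvMemFold _ (fun (x : Nat) p => pvCellN mask y x = false ∧
          ∃ q ∈ pvNbrs (y:Int) (x:Int), pvInB mask h w q = true ∧ p = q) ?_ ]
    · intro s x p
      by_cases hc : pvCellN mask y x
      · simp [hc]
      · rw [if_pos (by simp [hc])]
        rw [pvMemFold _ (fun (q : Int × Int) p => pvInB mask h w q = true ∧ p = q) ?_ ]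
        · rw [Bool.not_eq_true] at hc
          constructor
          · rintro (hs | ⟨q, hq, hP⟩)
            · exact Or.inl hs
            · exact Or.inr ⟨hc, q, hq, hP⟩
          · rintro (hs | ⟨_, q, hq, hP⟩)
            · exact Or.inl hs
            · exact Or.inr ⟨q, hq, hP⟩
        · intro s q p
          by_cases hin : pvInB mask h w q
          · rw [if_pos hin, PySem.Set.mem_add]
            simp [hin]
          · simp [hin]

theorem pvMem_boundary (mask : List (List Bool)) (h w : Nat) (p : Int × Int) :
    p ∈ pvBoundary mask h w ↔
      p ∈ pvScatter mask h w ∨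
      ∃ yy ∈ List.range h, ∃ xx ∈ List.range w,
        ((yy = 0 ∨ yy = h - 1 ∨ xx = 0 ∨ xx = w - 1) ∧ pvCellN mask yy xx = true) ∧
        p = ((yy:Int), (xx:Int)) := by
  unfold pvBoundary
  rw [pvMemFold _ (fun (y : Nat) p => ∃ xx ∈ List.range w,
        ((y = 0 ∨ y = h - 1 ∨ xx = 0 ∨ xx = w - 1) ∧ pvCellN mask y xx = true) ∧
        p = ((y:Int), (xx:Int))) ?_ ]
  intro s y p
  rw [pvMemFold _ (fun (x : Nat) p =>
        ((y = 0 ∨ y = h - 1 ∨ x = 0 ∨ x = w - 1) ∧ pvCellN mask y x = true) ∧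
        p = ((y:Int), (x:Int))) ?_ ]
  intro s x p
  by_cases hb : ((decide (y = 0) || decide (y = h - 1) || decide (x = 0) || decide (x = w - 1)) &&
      pvCellN mask y x) = true
  · rw [if_pos hb, PySem.Set.mem_add]
    simp only [Bool.and_eq_true, Bool.or_eq_true, decide_eq_true_eq] at hb
    constructor
    · rintro (hs | rfl)
      · exact Or.inl hs
      · exact Or.inr ⟨⟨by tauto, hb.2⟩, rfl⟩
    · rintro (hs | ⟨_, rfl⟩)
      · exact Or.inl hs
      · exact Or.inr rfl
  · rw [if_neg hb]
    simp only [Bool.and_eq_true, Bool.or_eq_true, decide_eq_true_eq, not_and_or, not_or] at hb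
    constructor
    · exact Or.inl
    · rintro (hs | ⟨⟨hbd, hc⟩, rfl⟩)
      · exact hs
      · exact absurd hc (by tauto)

-- the pointwise crux: set membership coincides with A's cell-and-keep test
theorem pvContains_eq (mask : List (List Bool)) (h w y x : Nat) (hy : y < h) (hx : x < w) :
    PySem.Set.contains (pvBoundary mask h w) ((y:Int), (x:Int)) =
      (pvCellN mask y x && pvKeep mask h w y x) := by
  rw [Bool.eq_iff_iff, PySem.Set.contains_iff, pvMem_boundary, pvMem_scatter]
  have cast_eq : ∀ a b : Nat, (((a:Int), (b:Int)) = ((y:Int), (x:Int))) ↔ (a = y ∧ b = x) := by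
    intro a b; constructor
    · intro hpq; obtain ⟨h1, h2⟩ := Prod.mk.injEq .. ▸ hpq
      exact ⟨by exact_mod_cast h1, by exact_mod_cast h2⟩
    · rintro ⟨rfl, rfl⟩; rfl
  constructor
  · rintro (⟨yy, hyy, xx, hxx, hc0, q, hq, hin, hpq⟩ | ⟨yy, hyy, xx, hxx, ⟨hbd, hc⟩, hpq⟩)
    · -- scattered from the False cell (yy,xx); q = (y,x)
      rw [List.mem_range] at hyy hxx
      subst hpq
      simp only [pvInB, Bool.and_eq_true, decide_eq_true_eq] at hin
      rw [pvCell_natCast] at hin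
      rw [hin.2, Bool.true_and]
      simp only [pvNbrs, List.mem_cons, List.not_mem_nil, or_false] at hq
      simp only [pvKeep, List.any_cons, List.any_nil, Bool.or_false, Bool.or_eq_true,
        Bool.not_eq_eq_eq_not, Bool.not_true, decide_eq_true_eq]
      rcases hq with hq | hq | hq | hq
      · -- q = (yy+1, xx): (yy,xx) = (y-1,x)
        obtain ⟨h1, h2⟩ := Prod.ext_iff.mp hq
        refine Or.inr (Or.inl (Or.inr ?_))
        rw [show ((y:Int) + -1) = ((yy:Nat):Int) by omega,
            show ((x:Int) + 0) = ((xx:Nat):Int) by omega, pvCell_natCast]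
        exact hc0
      · -- q = (yy-1, xx): (yy,xx) = (y+1,x)
        obtain ⟨h1, h2⟩ := Prod.ext_iff.mp hq
        refine Or.inl (Or.inr ?_)
        rw [show ((y:Int) + 1) = ((yy:Nat):Int) by omega,
            show ((x:Int) + 0) = ((xx:Nat):Int) by omega, pvCell_natCast]
        exact hc0
      · -- q = (yy, xx+1): (yy,xx) = (y,x-1)
        obtain ⟨h1, h2⟩ := Prod.ext_iff.mp hq
        refine Or.inr (Or.inr (Or.inr (Or.inr ?_)))
        rw [show ((y:Int) + 0) = ((yy:Nat):Int) by omega,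
            show ((x:Int) + -1) = ((xx:Nat):Int) by omega, pvCell_natCast]
        exact hc0
      · -- q = (yy, xx-1): (yy,xx) = (y,x+1)
        obtain ⟨h1, h2⟩ := Prod.ext_iff.mp hq
        refine Or.inr (Or.inr (Or.inl (Or.inr ?_)))
        rw [show ((y:Int) + 0) = ((yy:Nat):Int) by omega,
            show ((x:Int) + 1) = ((xx:Nat):Int) by omega, pvCell_natCast]
        exact hc0
    · -- a True border cell
      rw [List.mem_range] at hyy hxx
      obtain ⟨rfl, rfl⟩ := (cast_eq yy xx).mp hpq.symm
      rw [hc, Bool.true_and]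
      simp only [pvKeep, List.any_cons, List.any_nil, Bool.or_false, Bool.or_eq_true,
        decide_eq_true_eq]
      rcases hbd with rfl | h1 | rfl | h1
      · exact Or.inr (Or.inl (Or.inl (Or.inl (Or.inl (Or.inl (by omega))))))
      · exact Or.inl (Or.inl (Or.inl (Or.inl (Or.inr (by omega)))))
      · exact Or.inr (Or.inr (Or.inr (Or.inl (Or.inl (Or.inr (by omega))))))
      · exact Or.inr (Or.inr (Or.inl (Or.inl (Or.inr (by omega)))))
  · intro hck
    rw [Bool.and_eq_true] at hck
    obtain ⟨hc, hk⟩ := hck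
    simp only [pvKeep, List.any_cons, List.any_nil, Bool.or_false, Bool.or_eq_true,
      Bool.not_eq_eq_eq_not, Bool.not_true, decide_eq_true_eq] at hk
    have hinself : pvInB mask h w ((y:Int), (x:Int)) = true := by
      simp only [pvInB, Bool.and_eq_true, decide_eq_true_eq]
      refine ⟨⟨⟨⟨by omega, by omega⟩, by omega⟩, by omega⟩, by rw [pvCell_natCast]; exact hc⟩
    -- helper to close the scatter branch for a given False neighbour (yy,xx) and position in pvNbrs
    rcases hk with ((((h1|h1)|h1)|h1)|h1) | ((((h1|h1)|h1)|h1)|h1) | ((((h1|h1)|h1)|h1)|h1) | ((((h1|h1)|h1)|h1)|h1)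
    · omega
    · -- h ≤ y+1 : y = h-1, border
      exact Or.inr ⟨y, List.mem_range.mpr hy, x, List.mem_range.mpr hx,
        ⟨⟨Or.inr (Or.inl (by omega)), hc⟩, rfl⟩⟩
    · omega
    · omega
    · -- mask[y+1][x] false: scattered from (y+1,x) if in range, else y = h-1 is impossible here?
      by_cases hyh : y + 1 < h
      · refine Or.inl ⟨y + 1, List.mem_range.mpr hyh, x, List.mem_range.mpr hx, ?_, ((y:Int), (x:Int)), ?_, hinself, rfl⟩
        · rw [show ((y:Int) + 1) = ((y + 1 : Nat) : Int) by omega, show ((x:Int) + 0) = ((x:Nat) : Int) by omega, pvCell_natCast] at h1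
          exact h1
        · have he : ((y:Int), (x:Int)) = (((y + 1 : Nat):Int) - 1, ((x:Nat):Int)) := by
            rw [Prod.mk.injEq]; exact ⟨by omega, rfl⟩
          rw [he]; simp [pvNbrs]
      · exact Or.inr ⟨y, List.mem_range.mpr hy, x, List.mem_range.mpr hx,
          ⟨⟨Or.inr (Or.inl (by omega)), hc⟩, rfl⟩⟩
    · -- y-1 < 0 : y = 0, border
      exact Or.inr ⟨y, List.mem_range.mpr hy, x, List.mem_range.mpr hx,
        ⟨⟨Or.inl (by omega), hc⟩, rfl⟩⟩
    · omega
    · omega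
    · omega
    · -- mask[y-1][x] false (y > 0 or also covers y = 0 via wraparound? guard)
      by_cases hy0 : 0 < y
      · refine Or.inl ⟨y - 1, List.mem_range.mpr (by omega), x, List.mem_range.mpr hx, ?_, ((y:Int), (x:Int)), ?_, hinself, rfl⟩
        · rw [show ((y:Int) + -1) = ((y - 1 : Nat) : Int) by omega, show ((x:Int) + 0) = ((x:Nat) : Int) by omega, pvCell_natCast] at h1
          exact h1
        · have he : ((y:Int), (x:Int)) = (((y - 1 : Nat):Int) + 1, ((x:Nat):Int)) := by
            rw [Prod.mk.injEq]; exact ⟨by omega, rfl⟩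
          rw [he]; simp [pvNbrs]
      · exact Or.inr ⟨y, List.mem_range.mpr hy, x, List.mem_range.mpr hx,
          ⟨⟨Or.inl (by omega), hc⟩, rfl⟩⟩
    · omega
    · omega
    · omega
    · -- w ≤ x+1 : x = w-1, border
      exact Or.inr ⟨y, List.mem_range.mpr hy, x, List.mem_range.mpr hx,
        ⟨⟨Or.inr (Or.inr (Or.inr (by omega))), hc⟩, rfl⟩⟩
    · -- mask[y][x+1] false
      by_cases hxw : x + 1 < w
      · refine Or.inl ⟨y, List.mem_range.mpr hy, x + 1, List.mem_range.mpr hxw, ?_, ((y:Int), (x:Int)), ?_, hinself, rfl⟩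
        · rw [show ((y:Int) + 0) = ((y:Nat) : Int) by omega, show ((x:Int) + 1) = ((x + 1 : Nat) : Int) by omega, pvCell_natCast] at h1
          exact h1
        · have he : ((y:Int), (x:Int)) = (((y:Nat):Int), ((x + 1 : Nat):Int) - 1) := by
            rw [Prod.mk.injEq]; exact ⟨rfl, by omega⟩
          rw [he]; simp [pvNbrs]
      · exact Or.inr ⟨y, List.mem_range.mpr hy, x, List.mem_range.mpr hx,
          ⟨⟨Or.inr (Or.inr (Or.inr (by omega))), hc⟩, rfl⟩⟩
    · omega
    · omega
    · -- x-1 < 0 : x = 0, border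
      exact Or.inr ⟨y, List.mem_range.mpr hy, x, List.mem_range.mpr hx,
        ⟨⟨Or.inr (Or.inr (Or.inl (by omega))), hc⟩, rfl⟩⟩
    · omega
    · -- mask[y][x-1] false
      by_cases hx0 : 0 < x
      · refine Or.inl ⟨y, List.mem_range.mpr hy, x - 1, List.mem_range.mpr (by omega), ?_, ((y:Int), (x:Int)), ?_, hinself, rfl⟩
        · rw [show ((y:Int) + 0) = ((y:Nat) : Int) by omega, show ((x:Int) + -1) = ((x - 1 : Nat) : Int) by omega, pvCell_natCast] at h1
          exact h1
        · have he : ((y:Int), (x:Int)) = (((y:Nat):Int), ((x - 1 : Nat):Int) + 1) := by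
            rw [Prod.mk.injEq]; exact ⟨rfl, by omega⟩
          rw [he]; simp [pvNbrs]
      · exact Or.inr ⟨y, List.mem_range.mpr hy, x, List.mem_range.mpr hx,
          ⟨⟨Or.inr (Or.inr (Or.inl (by omega))), hc⟩, rfl⟩⟩

-- ===== VERDICT (by name: the statement is the Claim_ definition above) =====
theorem outline_mask_py_spec : Claim_equal_outline_mask_py := by
  intro mask _ _
  unfold Spec_outline_mask_py outline_mask_py outline_mask_py_alt
  obtain ⟨hl, hg⟩ := pvGrid_spec mask mask.length
    (if mask.length ≠ 0 then (mask.headD []).length else 0) pvCell pvKeep mask.length (le_refl _)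
  apply List.ext_getElem?
  intro y
  rw [hg y]
  by_cases hy : y < mask.length
  · rw [if_pos hy, List.getElem?_map, List.getElem?_range hy]
    simp only [Option.map_some, Option.some.injEq]
    apply List.map_congr_left
    intro x hx
    rw [List.mem_range] at hx
    rw [pvContains_eq mask _ _ y x hy hx, pvCell_natCast]
  · rw [if_neg hy, List.getElem?_map]
    simp [pvZeroMask, Nat.le_of_not_lt hy]
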